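-- pv_equiv track=rewrite | github.com/moevm/mse1h2026-prog1 | taskgen/src/theme2/build_stages.py | _compare_multiline_command
-- ===== SOURCE A (Python) =====
-- def _compare_multiline_command(output: str, expected: str) -> bool:
--     out_lines = [line.strip() for line in output.strip().split("\n") if line.strip()]
--     exp_lines = [line.strip() for line in expected.strip().split("\n") if line.strip()]
--
--     compile_cmds_out = [l for l in out_lines if l.startswith("gcc -c")]
--     compile_cmds_exp = [l for l in exp_lines if l.startswith("gcc -c")]
--
--     link_cmd_out = [l for l in out_lines if not l.startswith("gcc -c") and "gcc" in l]
--     link_cmd_exp = [l for l in exp_lines if not l.startswith("gcc -c") and "gcc" in l]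
--
--     return (sorted(compile_cmds_out) == sorted(compile_cmds_exp) and
--             len(link_cmd_out) == len(link_cmd_exp))
-- ===== SOURCE B (Python) =====
-- def _compare_multiline_command(output: str, expected: str) -> bool:
--     def lines(text):
--         return [l.strip() for l in text.strip().split("\n") if l.strip()]
--     remaining = []
--     out_links = 0
--     for l in lines(output):
--         if l.startswith("gcc -c"):
--             remaining.append(l)
--         elif "gcc" in l:
--             out_links += 1
--     exp_links = 0
--     for l in lines(expected):
--         if l.startswith("gcc -c"):
--             if l not in remaining:
--                 return False
--             remaining.remove(l)
--         elif "gcc" in l: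
--             exp_links += 1
--     return not remaining and out_links == exp_links
-- ===== Notes on version B (the rewrite author's own statement) =====
-- stated objective: alternative
-- what changed: Replaced A's six comprehensions with two sorts by a destructive matching loop: output's compile lines are collected once, then each expected compile line cancels one occurrence out of that pool with list.remove (early-exit False on a miss), and success means the pool ends empty; multiset equality is decided by cancellation instead of sorting.
import Mathlib
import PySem

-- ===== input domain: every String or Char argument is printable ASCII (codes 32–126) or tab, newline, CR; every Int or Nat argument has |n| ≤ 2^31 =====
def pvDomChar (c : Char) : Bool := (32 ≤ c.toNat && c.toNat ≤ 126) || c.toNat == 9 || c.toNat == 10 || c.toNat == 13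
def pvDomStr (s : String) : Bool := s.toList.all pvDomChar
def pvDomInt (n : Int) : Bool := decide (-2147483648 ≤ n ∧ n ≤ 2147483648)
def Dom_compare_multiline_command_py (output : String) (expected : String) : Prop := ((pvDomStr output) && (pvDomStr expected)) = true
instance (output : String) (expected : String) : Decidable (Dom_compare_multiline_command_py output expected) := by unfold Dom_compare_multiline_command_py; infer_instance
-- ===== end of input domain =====

-- B replaces A's six comprehensions plus two sorts by a destructive cancellation loop:
-- expected compile lines cancel occurrences out of output's compile-line pool (alternative decomposition).

-- ===== PORT A =====
def compare_multiline_command_py (output : String) (expected : String) : Bool :=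
  let out_lines := (((PySem.Str.split? (PySem.Str.strip output) "\n").getD []).filter
      (fun line => PySem.Str.strip line != "")).map PySem.Str.strip
  let exp_lines := (((PySem.Str.split? (PySem.Str.strip expected) "\n").getD []).filter
      (fun line => PySem.Str.strip line != "")).map PySem.Str.strip
  let compile_cmds_out := out_lines.filter (fun l => PySem.Str.startswith l "gcc -c")
  let compile_cmds_exp := exp_lines.filter (fun l => PySem.Str.startswith l "gcc -c")
  let link_cmd_out := out_lines.filter (fun l => !PySem.Str.startswith l "gcc -c" && PySem.Str.isIn "gcc" l)
  let link_cmd_exp := exp_lines.filter (fun l => !PySem.Str.startswith l "gcc -c" && PySem.Str.isIn "gcc" l)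
  (PySem.List.sorted compile_cmds_out (fun x => x) false == PySem.List.sorted compile_cmds_exp (fun x => x) false)
    && (link_cmd_out.length == link_cmd_exp.length)

-- ===== PORT B =====
-- Source B's lines(): stripped non-empty lines
def pvLinesAlt (text : String) : List String :=
  (((PySem.Str.split? (PySem.Str.strip text) "\n").getD []).map PySem.Str.strip).filter (fun l => l != "")

-- Source B's first loop: collect output's compile lines into a pool, count its link lines
def pvCollect (ls : List String) : List String × Int :=
  ls.foldl
    (fun st l =>
      if PySem.Str.startswith l "gcc -c" then (st.1 ++ [l], st.2)
      else if PySem.Str.isIn "gcc" l then (st.1, st.2 + 1)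
      else st)
    ([], 0)

-- Source B's second loop: each expected compile line removes one occurrence from the pool
-- (none = the early `return False` on a miss), counting expected link lines
def pvMatchLoop : List String → List String → Int → Option (List String × Int)
  | [], rem, k => some (rem, k)
  | l :: t, rem, k =>
    if PySem.Str.startswith l "gcc -c" then
      match PySem.List.remove? rem l with
      | some rem' => pvMatchLoop t rem' k
      | none => none
    else if PySem.Str.isIn "gcc" l then pvMatchLoop t rem (k + 1)
    else pvMatchLoop t rem k

def compare_multiline_command_py_alt (output : String) (expected : String) : Bool :=
  let st := pvCollect (pvLinesAlt output)
  match pvMatchLoop (pvLinesAlt expected) st.1 0 with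
  | none => false
  | some (rem, exp_links) => rem.isEmpty && st.2 == exp_links

-- ===== PRECONDITION & SPEC =====
def Spec_compare_multiline_command_py (output : String) (expected : String) (out : Bool) : Prop := out = compare_multiline_command_py_alt output expected
instance (output : String) (expected : String) (out : Bool) : Decidable (Spec_compare_multiline_command_py output expected out) := by unfold Spec_compare_multiline_command_py; infer_instance

-- ===== CLAIM (what is proved, stated in full; the proofs are below) =====
def Claim_equal_compare_multiline_command_py : Prop := ∀ (output : String) (expected : String), Dom_compare_multiline_command_py output expected → Spec_compare_multiline_command_py output expected (compare_multiline_command_py output expected)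

-- ===== LEMMAS AND PROOFS =====

def pvCompileP (l : String) : Bool := PySem.Str.startswith l "gcc -c"
def pvLinkP (l : String) : Bool := !PySem.Str.startswith l "gcc -c" && PySem.Str.isIn "gcc" l

lemma pvLines_eq (text : String) :
    (((PySem.Str.split? (PySem.Str.strip text) "\n").getD []).filter
      (fun line => PySem.Str.strip line != "")).map PySem.Str.strip = pvLinesAlt text := by
  simp [pvLinesAlt, List.filter_map, Function.comp_def]

lemma pvCollect_fold (L : List String) (acc : List String) (n : Int) :
    L.foldl
      (fun st l =>
        if PySem.Str.startswith l "gcc -c" then (st.1 ++ [l], st.2)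
        else if PySem.Str.isIn "gcc" l then (st.1, st.2 + 1)
        else st)
      (acc, n)
    = (acc ++ L.filter pvCompileP, n + (L.countP pvLinkP : Int)) := by
  induction L generalizing acc n with
  | nil => simp
  | cons l t ih =>
    simp only [List.foldl_cons]
    by_cases hc : (PySem.Str.startswith l "gcc -c") = true
    · have hl : ¬(pvLinkP l = true) := by
        simp only [pvLinkP, hc, Bool.not_true, Bool.false_and]; exact Bool.false_ne_true
      rw [if_pos hc, ih, List.filter_cons, if_pos (show pvCompileP l = true from hc),
        List.countP_cons, if_neg hl]
      simp
    · have hcb : PySem.Str.startswith l "gcc -c" = false := by rwa [Bool.not_eq_true] at hc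
      by_cases hi : (PySem.Str.isIn "gcc" l) = true
      · have hl : pvLinkP l = true := by
          simp only [pvLinkP, hcb, hi, Bool.not_false, Bool.true_and]
        rw [if_neg hc, if_pos hi, ih, List.filter_cons,
          if_neg (show ¬(pvCompileP l = true) from hc), List.countP_cons, if_pos hl]
        refine Prod.ext rfl ?_
        push_cast; ring
      · have hl : ¬(pvLinkP l = true) := by
          simp only [pvLinkP, Bool.and_eq_true]; exact fun h => hi h.2
        rw [if_neg hc, if_neg hi, ih, List.filter_cons,
          if_neg (show ¬(pvCompileP l = true) from hc), List.countP_cons, if_neg hl]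
        simp

lemma pvCollect_eq (L : List String) :
    pvCollect L = (L.filter pvCompileP, (L.countP pvLinkP : Int)) := by
  rw [pvCollect, pvCollect_fold]; simp

-- proof-level view of the cancellation loop restricted to the compile lines
def pvConsume : List String → List String → Option (List String)
  | xs, [] => some xs
  | xs, y :: t =>
    match PySem.List.remove? xs y with
    | some r => pvConsume r t
    | none => none

lemma pvMatchLoop_eq (L : List String) (rem : List String) (k : Int) :
    pvMatchLoop L rem k
    = (pvConsume rem (L.filter pvCompileP)).map
        (fun r => (r, k + (L.countP pvLinkP : Int))) := by
  induction L generalizing rem k with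
  | nil => simp [pvMatchLoop, pvConsume]
  | cons l t ih =>
    by_cases hc : (PySem.Str.startswith l "gcc -c") = true
    · have hl : ¬(pvLinkP l = true) := by
        simp only [pvLinkP, hc, Bool.not_true, Bool.false_and]; exact Bool.false_ne_true
      rw [pvMatchLoop, if_pos hc, List.filter_cons, if_pos (show pvCompileP l = true from hc),
        List.countP_cons, if_neg hl]
      cases h : PySem.List.remove? rem l with
      | none => simp [pvConsume, h]
      | some r => simp [pvConsume, h, ih]
    · have hcb : PySem.Str.startswith l "gcc -c" = false := by rwa [Bool.not_eq_true] at hc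
      rw [List.filter_cons, if_neg (show ¬(pvCompileP l = true) from hc)]
      by_cases hi : (PySem.Str.isIn "gcc" l) = true
      · have hl : pvLinkP l = true := by
          simp only [pvLinkP, hcb, hi, Bool.not_false, Bool.true_and]
        rw [pvMatchLoop, if_neg hc, if_pos hi, ih, List.countP_cons, if_pos hl]
        cases pvConsume rem (t.filter pvCompileP) with
        | none => rfl
        | some r =>
          simp only [Option.map_some]
          refine congrArg some (Prod.ext rfl ?_)
          push_cast; ring
      · have hl : ¬(pvLinkP l = true) := by
          simp only [pvLinkP, Bool.and_eq_true]; exact fun h => hi h.2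
        rw [pvMatchLoop, if_neg hc, if_neg hi, ih, List.countP_cons, if_neg hl]
        simp

lemma pvConsume_nil_iff_perm (ys : List String) : ∀ xs : List String,
    pvConsume xs ys = some [] ↔ xs.Perm ys := by
  induction ys with
  | nil =>
    intro xs
    simp [pvConsume, List.perm_nil]
  | cons y t ih =>
    intro xs
    cases h : PySem.List.remove? xs y with
    | none =>
      have hy : y ∉ xs := (PySem.List.remove?_eq_none_iff xs y).mp h
      simp only [pvConsume, h]
      constructor
      · intro hfalse; cases hfalse
      · intro hp; exact absurd (hp.mem_iff.mpr (List.mem_cons_self)) hy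
    | some r =>
      have hy : y ∈ xs := by
        by_contra hny
        rw [(PySem.List.remove?_eq_none_iff xs y).mpr hny] at h; cases h
      have hr : r = xs.erase y := by
        have := PySem.List.remove?_eq_some_erase xs y hy
        rw [this] at h; exact ((Option.some.injEq _ _).mp h).symm
      have hxy : xs.Perm (y :: xs.erase y) := List.perm_cons_erase hy
      simp only [pvConsume, h, ih r]
      constructor
      · intro hp
        exact hxy.trans ((List.perm_cons y).mpr (hr ▸ hp))
      · intro hp
        have : (y :: xs.erase y).Perm (y :: t) := hxy.symm.trans hp
        exact hr ▸ (List.perm_cons y).mp this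

-- ===== VERDICT (by name: the statement is the Claim_ definition above) =====
theorem compare_multiline_command_py_spec : Claim_equal_compare_multiline_command_py := by
  intro output expected _
  unfold Spec_compare_multiline_command_py compare_multiline_command_py compare_multiline_command_py_alt
  simp only [pvLines_eq, pvCollect_eq, pvMatchLoop_eq]
  have e1 : (fun l => PySem.Str.startswith l "gcc -c") = pvCompileP := rfl
  have e2 : (fun l => !PySem.Str.startswith l "gcc -c" && PySem.Str.isIn "gcc" l) = pvLinkP := rfl
  rw [e1, e2, Bool.eq_iff_iff]
  set cO := (pvLinesAlt output).filter pvCompileP with hcO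
  set cE := (pvLinesAlt expected).filter pvCompileP with hcE
  set nO := (pvLinesAlt output).countP pvLinkP with hnO
  set nE := (pvLinesAlt expected).countP pvLinkP with hnE
  have hA : ((PySem.List.sorted cO (fun x => x) false == PySem.List.sorted cE (fun x => x) false)
      && (((pvLinesAlt output).filter pvLinkP).length == ((pvLinesAlt expected).filter pvLinkP).length)) = true
      ↔ (cO.Perm cE ∧ nO = nE) := by
    simp only [Bool.and_eq_true, beq_iff_eq, PySem.List.sorted_id_eq_sorted_id_iff_perm,
      ← List.countP_eq_length_filter, hnO, hnE]
  have hB : (cO.Perm cE ∧ nO = nE) ↔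
      ((match (pvConsume cO cE).map (fun r => (r, (0 : Int) + (nE : Int))) with
        | none => false
        | some (rem, exp_links) => rem.isEmpty && ((nO : Int) == exp_links)) = true) := by
    cases h : pvConsume cO cE with
    | none =>
      simp only [Option.map_none]
      constructor
      · rintro ⟨hp, _⟩
        rw [(pvConsume_nil_iff_perm cE cO).mpr hp] at h; cases h
      · intro hfalse; cases hfalse
    | some r =>
      simp only [Option.map_some, Bool.and_eq_true, List.isEmpty_iff, beq_iff_eq]
      have hperm : cO.Perm cE ↔ r = [] := by
        rw [← pvConsume_nil_iff_perm cE cO, h]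
        exact ⟨fun hs => ((Option.some.injEq _ _).mp hs), fun hr => by rw [hr]⟩
      constructor
      · rintro ⟨hp, hn⟩
        exact ⟨hperm.mp hp, by rw [hn]; ring⟩
      · rintro ⟨hr, hn⟩
        refine ⟨hperm.mpr hr, ?_⟩
        have : (nO : Int) = (nE : Int) := by rw [hn]; ring
        exact_mod_cast this
  exact hA.trans hB
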